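/- GENERATED by c/gen_decode.py: decode facts of the image, one per distinct instruction byte string. -/
import UserX.DecodeImage

#decode_all ProgX.Base.Dec
  "0fb6800000c000"  -- movzx eax,BYTE PTR [rax+0xc00000]
  "4801ee"  -- add rsi,rbp
  "4883ec08"  -- sub rsp,0x8
  "4889df"  -- mov rdi,rbx
  "488d770f"  -- lea rsi,[rdi+0xf]
  "4989d6"  -- mov r14,rdx
  "4c89e8"  -- mov rax,r13
  "660f2f05ebd70300"  -- comisd xmm0,QWORD PTR [rip+0x3d7eb]
  "732f"  -- jae 10138d
  "75e3"  -- jne 1018e2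
  "7fec"  -- jg 100cc6
  "b8e0ff3f00"  -- mov eax,0x3fffe0
  "e811f7ffff"  -- call 101d00
  "e8aafaffff"  -- call 100059
  "e9abfeffff"  -- jmp 10297f
  "ebfb"  -- jmp 1016e6
  "f20f5805abd70300"  -- addsd xmm0,QWORD PTR [rip+0x3d7ab]
  "f20f59ca"  -- mulsd xmm1,xmm2
  "f20f5e1d87da0300"  -- divsd xmm3,QWORD PTR [rip+0x3da87]
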